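-- pv_equiv track=rewrite | github.com/shivalidalmia/MastersDataScience-UST | Python/Python Misc Programs/test_poker_odds2.py | has_one_pair
-- ===== SOURCE A (Python) =====
-- def has_one_pair(rdict):
--     pair_count = 0
--     three_count = 0
--     for v in rdict.values():
--         if v == 2:
--             pair_count += 1
--         elif v == 3:
--             three_count += 1
--
--     if pair_count == 1 and three_count != 1:
--         return True
--     else:
--         return False
-- ===== SOURCE B (Python) =====
-- def has_one_pair(rdict):
--     vs = list(rdict.values())
--     if 2 not in vs:
--         return False
--     if 2 in vs[vs.index(2) + 1:]:
--         return False
--     if 3 not in vs: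
--         return True
--     return 3 in vs[vs.index(3) + 1:]
-- ===== Notes on version B (the rewrite author's own statement) =====
-- stated objective: alternative
-- what changed: Replaces A's tallying loop (two scalar accumulators then a final test) with a search-based uniqueness check: locate the first occurrence of 2 and test the remaining suffix for another 2 (and likewise for 3), with early returns and no counters at all.
import Mathlib
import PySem

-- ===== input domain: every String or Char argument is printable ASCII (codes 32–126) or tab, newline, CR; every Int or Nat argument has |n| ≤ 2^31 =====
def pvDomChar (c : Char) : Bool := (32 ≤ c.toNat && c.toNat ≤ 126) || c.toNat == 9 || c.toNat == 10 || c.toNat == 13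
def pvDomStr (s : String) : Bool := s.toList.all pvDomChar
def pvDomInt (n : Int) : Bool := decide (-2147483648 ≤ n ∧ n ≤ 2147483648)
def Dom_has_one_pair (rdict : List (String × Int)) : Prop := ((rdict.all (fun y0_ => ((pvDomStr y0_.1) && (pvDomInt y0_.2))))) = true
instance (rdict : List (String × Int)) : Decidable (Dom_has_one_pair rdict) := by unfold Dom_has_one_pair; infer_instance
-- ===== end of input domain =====

-- B checks "exactly one 2, not exactly one 3" by first-occurrence search plus a suffix membership test (no counters); objective: alternative.


-- ===== PORT A =====
-- loop over rdict.values() accumulating (pair_count, three_count), then the final test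
def has_one_pair (rdict : List (String × Int)) : Bool :=
  let counts := ((PySem.Dict.ofList rdict).values).foldl
    (fun (st : Int × Int) v =>
      if v = 2 then (st.1 + 1, st.2)
      else if v = 3 then (st.1, st.2 + 1)
      else st) (0, 0)
  if counts.1 = 1 ∧ counts.2 ≠ 1 then true else false

-- ===== PORT B =====
-- vs = list(rdict.values()); early returns on '2 not in vs', '2 in vs[vs.index(2)+1:]', '3 not in vs'; else '3 in vs[vs.index(3)+1:]'
def has_one_pair_alt (rdict : List (String × Int)) : Bool :=
  let vs := (PySem.Dict.ofList rdict).values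
  if ¬ (vs.contains 2) then false
  else
    match PySem.List.index? vs 2 with
    | none => false  -- unreachable: 2 ∈ vs
    | some i =>
      if (PySem.List.slice vs (some ((i : Int) + 1)) none).contains 2 then false
      else if ¬ (vs.contains 3) then true
      else
        match PySem.List.index? vs 3 with
        | none => true  -- unreachable: 3 ∈ vs
        | some j => (PySem.List.slice vs (some ((j : Int) + 1)) none).contains 3

-- ===== PRECONDITION & SPEC =====
def Spec_has_one_pair (rdict : List (String × Int)) (out : Bool) : Prop := out = has_one_pair_alt rdict
instance (rdict : List (String × Int)) (out : Bool) : Decidable (Spec_has_one_pair rdict out) := by unfold Spec_has_one_pair; infer_instance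

-- ===== CLAIM =====
def Claim_equal_has_one_pair : Prop := ∀ (rdict : List (String × Int)), Dom_has_one_pair rdict → Spec_has_one_pair rdict (has_one_pair rdict)

-- ===== LEMMAS AND PROOFS =====

-- A's accumulator computes the counts of 2 and 3 among the values
theorem pv_foldl_counts (vs : List Int) (p t : Int) :
    vs.foldl (fun (st : Int × Int) v =>
      if v = 2 then (st.1 + 1, st.2)
      else if v = 3 then (st.1, st.2 + 1)
      else st) (p, t) = (p + vs.count 2, t + vs.count 3) := by
  induction vs generalizing p t with
  | nil => simp
  | cons v vs ih =>
    simp only [List.foldl_cons]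
    by_cases h2 : v = 2
    · subst h2; simp only [ih, List.count_cons, Prod.ext_iff]; norm_num; ring
    · by_cases h3 : v = 3
      · subst h3; simp only [if_neg h2, ih, List.count_cons, Prod.ext_iff]; norm_num; ring
      · simp only [if_neg h2, if_neg h3, ih, List.count_cons, Prod.ext_iff]; simp [h2, h3]

-- after the first occurrence of x (at index i), the suffix contains x iff x occurs at least twice
theorem pv_suffix_count (vs : List Int) (x : Int) (i : Nat)
    (h : PySem.List.index? vs x = some i) :
    ((vs.drop (i + 1)).contains x = true ↔ vs.count x ≠ 1) := by
  obtain ⟨pre, suf, rfl, hlen, hnot⟩ := (PySem.List.index?_eq_some_iff vs x i).1 h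
  have hdrop : (pre ++ x :: suf).drop (i + 1) = suf := by
    subst hlen
    simp [List.drop_append]
  have hcnt : (pre ++ x :: suf).count x = suf.count x + 1 := by
    simp [List.count_append, List.count_eq_zero_of_not_mem hnot]
  rw [hdrop, hcnt]
  simp [← List.count_pos_iff]
  omega


-- B as a condition on counts: exactly one 2 and not exactly one 3
theorem pv_alt_counts (rdict : List (String × Int)) :
    has_one_pair_alt rdict = true ↔
      (((PySem.Dict.ofList rdict).values).count 2 = 1 ∧
       ((PySem.Dict.ofList rdict).values).count 3 ≠ 1) := by
  unfold has_one_pair_alt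
  set vs := (PySem.Dict.ofList rdict).values with hvs
  cases h2i : PySem.List.index? vs 2 with
  | none =>
      have h2 : (2 : Int) ∉ vs := (PySem.List.index?_eq_none_iff vs 2).1 h2i
      simp only [h2i]
      simp [h2, List.count_eq_zero_of_not_mem h2]
  | some i =>
      have h2mem : (2 : Int) ∈ vs := by
        have := PySem.List.index?_isSome_iff vs 2
        rw [h2i] at this; simpa using this
      have hs2 : PySem.List.slice vs (some ((i : Int) + 1)) none = vs.drop (i + 1) := by
        rw [show ((i : Int) + 1) = (((i + 1 : Nat)) : Int) by push_cast; ring,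
            PySem.List.slice_from_natCast]
      have hc2iff := pv_suffix_count vs 2 i h2i
      by_cases hc2 : (vs.drop (i + 1)).contains 2 = true
      · have hne : vs.count 2 ≠ 1 := hc2iff.1 hc2
        have hm2 : (2 : Int) ∈ vs.drop (i + 1) := by simpa using hc2
        simp only [h2i, hs2]
        simp [h2mem, hm2, hne]
      · have hcnt2 : vs.count 2 = 1 := by
          by_contra h; exact hc2 (hc2iff.2 h)
        have hm2 : (2 : Int) ∉ vs.drop (i + 1) := by simpa using hc2
        cases h3i : PySem.List.index? vs 3 with
        | none =>
            have h3 : (3 : Int) ∉ vs := (PySem.List.index?_eq_none_iff vs 3).1 h3i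
            simp only [h2i, h3i, hs2]
            simp [h2mem, hm2, h3, hcnt2,
                  List.count_eq_zero_of_not_mem h3]
        | some j =>
            have h3mem : (3 : Int) ∈ vs := by
              have := PySem.List.index?_isSome_iff vs 3
              rw [h3i] at this; simpa using this
            have hs3 : PySem.List.slice vs (some ((j : Int) + 1)) none = vs.drop (j + 1) := by
              rw [show ((j : Int) + 1) = (((j + 1 : Nat)) : Int) by push_cast; ring,
                  PySem.List.slice_from_natCast]
            have hc3iff := pv_suffix_count vs 3 j h3i
            by_cases hc3 : (vs.drop (j + 1)).contains 3 = true
            · have hne : vs.count 3 ≠ 1 := hc3iff.1 hc3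
              have hm3 : (3 : Int) ∈ vs.drop (j + 1) := by simpa using hc3
              simp only [h2i, h3i, hs2, hs3]
              simp [h2mem, h3mem, hm2, hm3, hcnt2, hne]
            · have hcnt3 : vs.count 3 = 1 := by
                by_contra h; exact hc3 (hc3iff.2 h)
              have hm3 : (3 : Int) ∉ vs.drop (j + 1) := by simpa using hc3
              simp only [h2i, h3i, hs2, hs3]
              simp [h2mem, h3mem, hm2, hm3, hcnt2, hcnt3]

-- ===== VERDICT =====
theorem has_one_pair_spec : Claim_equal_has_one_pair := by
  intro rdict _
  unfold Spec_has_one_pair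
  rw [← Bool.coe_iff_coe, pv_alt_counts]
  unfold has_one_pair
  simp only [pv_foldl_counts]
  set vs := (PySem.Dict.ofList rdict).values
  by_cases h2 : vs.count 2 = 1 <;> by_cases h3 : vs.count 3 = 1 <;>
    simp [h2, h3]
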